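-- pv_equiv track=rewrite | github.com/CSL-KU/drama-pp | re/gf2_bank_solver.py | matrix_to_masks
-- ===== SOURCE A (Python) =====
-- from typing import Dict, List, Optional, Sequence, Tuple
--
-- def matrix_to_masks(matrix: List[List[int]]) -> List[int]:
--     if not matrix:
--         return []
--     masks: List[int] = []
--     for col in range(len(matrix[0])):
--         mask = 0
--         for row in range(len(matrix)):
--             if matrix[row][col]:
--                 mask |= 1 << row
--         masks.append(mask)
--     return masks
-- ===== SOURCE B (Python) =====
-- def matrix_to_masks(matrix):
--     if not matrix:
--         return []
--     masks = [0] * len(matrix[0])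
--     for row in reversed(matrix):
--         masks = [2 * m + (1 if row[c] else 0) for c, m in enumerate(masks)]
--     return masks
-- ===== Notes on version B (the rewrite author's own statement) =====
-- stated objective: alternative
-- what changed: B treats each column as a binary number and evaluates it by Horner's scheme: it walks the rows in reverse and rebuilds the whole mask list each step as masks[c] = 2*masks[c] + (1 if row[c] else 0), with no bit positions, shifts or ORs, instead of A's per-column loop that ORs 1<<row into an accumulator.
import Mathlib
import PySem

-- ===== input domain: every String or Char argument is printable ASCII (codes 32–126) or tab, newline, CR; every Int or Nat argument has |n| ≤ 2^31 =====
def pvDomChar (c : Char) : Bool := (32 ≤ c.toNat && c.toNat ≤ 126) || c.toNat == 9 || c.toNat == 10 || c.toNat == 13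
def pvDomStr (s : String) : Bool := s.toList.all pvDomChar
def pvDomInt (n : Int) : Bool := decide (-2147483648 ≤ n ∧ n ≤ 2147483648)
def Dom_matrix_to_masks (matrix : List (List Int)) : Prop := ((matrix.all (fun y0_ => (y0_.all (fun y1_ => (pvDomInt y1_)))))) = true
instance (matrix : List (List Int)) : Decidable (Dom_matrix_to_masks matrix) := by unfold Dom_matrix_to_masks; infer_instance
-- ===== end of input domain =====

-- B evaluates each column as a binary number by Horner's scheme over the rows in reverse
-- (masks[c] = 2*masks[c] + row bit), with no shifts or ORs, instead of A's per-column
-- OR-accumulation of 1<<row; objective: alternative.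
-- '1 << row' and '|' in A are ported via Lean's '<<<' and PySem.Int.bor (Python-exact);
-- 'matrix[row][col]' / 'row[c]' are ported via pyGet? with getD defaults — exact on Pre_,
-- where every index read is in range.

-- ===== PORT A =====
def matrix_to_masks (matrix : List (List Int)) : List Int :=
  if matrix = [] then []
  else
    (PySem.List.pyRange 0 ((matrix.headD []).length : Int) 1).foldl
      (fun masks col =>
        masks ++ [(PySem.List.pyRange 0 (matrix.length : Int) 1).foldl
          (fun mask row =>
            if (PySem.List.pyGet? ((PySem.List.pyGet? matrix row).getD []) col).getD 0 ≠ 0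
            then PySem.Int.bor mask ((1 : Int) <<< row.toNat) else mask) 0])
      []

-- ===== PORT B =====
def matrix_to_masks_alt (matrix : List (List Int)) : List Int :=
  if matrix = [] then []
  else
    matrix.reverse.foldl
      (fun masks row =>
        (PySem.List.enumerate masks).map
          (fun cm => 2 * cm.2 + (if (PySem.List.pyGet? row cm.1).getD 0 ≠ 0 then (1 : Int) else 0)))
      (List.replicate (matrix.headD []).length 0)

-- ===== PRECONDITION & SPEC =====
-- Pre_ excludes exactly the ragged matrices on which Python A raises IndexError
-- (some row shorter than the first row); Python B raises there too.
def Pre_matrix_to_masks (matrix : List (List Int)) : Prop :=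
  ∀ r ∈ matrix, (matrix.headD []).length ≤ r.length
instance (matrix : List (List Int)) : Decidable (Pre_matrix_to_masks matrix) := by
  unfold Pre_matrix_to_masks; infer_instance
def pvWitness_matrix_to_masks : List (List Int) := [[1, 0], [0, 1], [1, 1]]
def Spec_matrix_to_masks (matrix : List (List Int)) (out : List Int) : Prop := out = matrix_to_masks_alt matrix
instance (matrix : List (List Int)) (out : List Int) : Decidable (Spec_matrix_to_masks matrix out) := by unfold Spec_matrix_to_masks; infer_instance

-- ===== CLAIM (what is proved, stated in full; the proofs are below) =====
def Claim_equal_matrix_to_masks : Prop := ∀ (matrix : List (List Int)), Dom_matrix_to_masks matrix → Pre_matrix_to_masks matrix → Spec_matrix_to_masks matrix (matrix_to_masks matrix)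

-- ===== LEMMAS AND PROOFS =====

-- matrix[row][col] as A reads it (default 0 outside range; exact on Pre_)
def pvElem (matrix : List (List Int)) (row col : Int) : Int :=
  (PySem.List.pyGet? ((PySem.List.pyGet? matrix row).getD []) col).getD 0

-- the mask of column `col` accumulated over rows 0..n-1 (A's inner loop)
def pvMask (matrix : List (List Int)) (n col : Int) : Int :=
  (PySem.List.pyRange 0 n 1).foldl
    (fun mask row => if pvElem matrix row col ≠ 0 then PySem.Int.bor mask ((1 : Int) <<< row.toNat) else mask) 0

-- row's contribution bit for column c, as B reads it
def pvBit (row : List Int) (c : Int) : Int :=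
  if (PySem.List.pyGet? row c).getD 0 ≠ 0 then 1 else 0

-- the value of column c as a binary number, Horner-style over the rows (B's view)
def pvHorner (rows : List (List Int)) (c : Int) : Int :=
  rows.foldr (fun row acc => 2 * acc + pvBit row c) 0

theorem pvMask_zero (matrix : List (List Int)) (col : Int) : pvMask matrix 0 col = 0 := by
  simp [pvMask, PySem.List.pyRange_one_eq_nil]

theorem pvMask_succ (matrix : List (List Int)) (k : Nat) (col : Int) :
    pvMask matrix ((k : Int) + 1) col =
      if pvElem matrix (k : Int) col ≠ 0 then PySem.Int.bor (pvMask matrix (k : Int) col) ((1 : Int) <<< k)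
      else pvMask matrix (k : Int) col := by
  unfold pvMask
  rw [PySem.List.pyRange_one_succ_right (by positivity)]
  simp [List.foldl_append]

-- the bit sum both programs compute for column c over the first n rows
def pvSum (matrix : List (List Int)) (n : Nat) (c : Int) : Int :=
  ∑ i ∈ Finset.range n, (if pvElem matrix (i : Int) c ≠ 0 then (1 : Int) else 0) * 2 ^ i

theorem pvSum_bounds (matrix : List (List Int)) (c : Int) (n : Nat) :
    0 ≤ pvSum matrix n c ∧ pvSum matrix n c < 2 ^ n := by
  induction n with
  | zero => simp [pvSum]
  | succ k ih =>
    have h : pvSum matrix (k + 1) c = pvSum matrix k c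
        + (if pvElem matrix (k : Int) c ≠ 0 then (1 : Int) else 0) * 2 ^ k := by
      unfold pvSum; rw [Finset.sum_range_succ]
    have hp : (0 : Int) < 2 ^ k := by positivity
    constructor
    · rw [h]; split <;> nlinarith [ih.1]
    · rw [h]
      have : (2 : Int) ^ (k + 1) = 2 ^ k + 2 ^ k := by ring
      rw [this]; split <;> nlinarith [ih.2]

theorem pv_bor_pow (S : Int) (k : Nat) (h0 : 0 ≤ S) (h1 : S < 2 ^ k) :
    PySem.Int.bor S ((1 : Int) <<< k) = S + 2 ^ k := by
  have hsh : (1 : Int) <<< k = 2 ^ k := by rw [Int.shiftLeft_eq]; ring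
  rw [hsh, PySem.Int.bor_of_nonneg h0 (by positivity)]
  have ht : ((2 : Int) ^ k).toNat = 2 ^ k := by
    rw [show (2:Int)^k = ((2^k : Nat) : Int) by push_cast; ring, Int.toNat_natCast]
  have hlt : S.toNat < 2 ^ k := by omega
  have := Nat.two_pow_add_eq_or_of_lt (i := k) (b := S.toNat) hlt 1
  rw [mul_one] at this
  rw [ht, Nat.lor_comm, ← this]
  push_cast
  omega

theorem pvMask_eq_sum (matrix : List (List Int)) (c : Int) (n : Nat) :
    pvMask matrix (n : Int) c = pvSum matrix n c := by
  induction n with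
  | zero => simpa [pvSum] using pvMask_zero matrix c
  | succ k ih =>
    have hb := pvSum_bounds matrix c k
    have hstep : pvSum matrix (k + 1) c = pvSum matrix k c
        + (if pvElem matrix (k : Int) c ≠ 0 then (1 : Int) else 0) * 2 ^ k := by
      unfold pvSum; rw [Finset.sum_range_succ]
    rw [show ((k + 1 : Nat) : Int) = (k : Int) + 1 by push_cast; ring, pvMask_succ, ih, hstep]
    split
    · rw [pv_bor_pow _ _ hb.1 hb.2]; ring
    · ring

theorem pvHorner_eq_sum (c : Int) (rows : List (List Int)) :
    pvHorner rows c = ∑ i ∈ Finset.range rows.length, pvBit (rows.getD i []) c * 2 ^ i := by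
  induction rows with
  | nil => simp [pvHorner]
  | cons r rest ih =>
    have hL : pvHorner (r :: rest) c = 2 * pvHorner rest c + pvBit r c := rfl
    rw [hL, ih, List.length_cons, Finset.sum_range_succ']
    simp only [List.getD_cons_succ, List.getD_cons_zero, pow_zero, mul_one, pow_succ]
    rw [Finset.mul_sum]
    congr 1
    apply Finset.sum_congr rfl
    intro i _
    ring

-- the two sums coincide: A reads matrix[i] through pyGet?, B through structural getD
theorem pvSum_eq_horner (matrix : List (List Int)) (c : Int) :
    pvSum matrix matrix.length c
      = ∑ i ∈ Finset.range matrix.length, pvBit (matrix.getD i []) c * 2 ^ i := by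
  unfold pvSum
  apply Finset.sum_congr rfl
  intro i hi
  have hi' : i < matrix.length := Finset.mem_range.mp hi
  have hget : (PySem.List.pyGet? matrix (i : Int)).getD [] = matrix.getD i [] := by
    rw [PySem.List.pyGet?_natCast, List.getD_eq_getElem?_getD]
  simp only [pvBit, pvElem, hget]

-- PySem.List.enumerate written out over List.range
theorem pv_enumerate_eq (l : List Int) : ∀ s : Int,
    PySem.List.enumerate l s = (List.range l.length).map (fun (i : Nat) => ((s + i : Int), l.getD i 0)) := by
  induction l with
  | nil => intro s; simp [PySem.List.enumerate]
  | cons x t ih =>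
    intro s
    have hc : PySem.List.enumerate (x :: t) s = (s, x) :: PySem.List.enumerate t (s + 1) := by
      simp [PySem.List.enumerate]
    rw [hc, ih (s + 1), List.length_cons, List.range_succ_eq_map, List.map_cons, List.map_map]
    refine List.cons_eq_cons.mpr ⟨by simp, ?_⟩
    apply List.map_congr_left
    intro i _
    simp only [Function.comp_apply, List.getD_cons_succ]
    congr 1
    push_cast
    ring

-- B's per-row step applied to a range-map state
theorem pv_step (row : List Int) (mN : Nat) (g : Nat → Int) :
    (PySem.List.enumerate ((List.range mN).map g)).map
        (fun cm => 2 * cm.2 + (if (PySem.List.pyGet? row cm.1).getD 0 ≠ 0 then (1 : Int) else 0))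
      = (List.range mN).map (fun (c : Nat) => 2 * g c + pvBit row (c : Int)) := by
  rw [pv_enumerate_eq, List.length_map, List.length_range, List.map_map]
  apply List.map_congr_left
  intro i hi
  have hi' : i < mN := List.mem_range.mp hi
  have hg : ((List.range mN).map g).getD i 0 = g i := by
    rw [List.getD_eq_getElem?_getD, List.getElem?_map, List.getElem?_range hi']
    rfl
  simp only [Function.comp_apply, zero_add, hg, pvBit]

-- B's whole fold yields the Horner values per column
theorem pv_B_fold (mN : Nat) (rows : List (List Int)) :
    rows.foldr
        (fun row masks =>
          (PySem.List.enumerate masks).map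
            (fun cm => 2 * cm.2 + (if (PySem.List.pyGet? row cm.1).getD 0 ≠ 0 then (1 : Int) else 0)))
        (List.replicate mN 0)
      = (List.range mN).map (fun (c : Nat) => pvHorner rows (c : Int)) := by
  induction rows with
  | nil =>
    simp only [List.foldr_nil]
    rw [show List.replicate mN (0 : Int) = (List.range mN).map (fun _ => 0) by
      rw [List.map_const', List.length_range]]
    simp [pvHorner]
  | cons r rest ih =>
    rw [List.foldr_cons, ih, pv_step]
    apply List.map_congr_left
    intro c _
    rfl

-- A's port as a map of pvMask over the columns
theorem pv_A_char (matrix : List (List Int)) (h : matrix ≠ []) :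
    matrix_to_masks matrix =
      (List.range (matrix.headD []).length).map
        (fun (c : Nat) => pvMask matrix (matrix.length : Int) (c : Int)) := by
  unfold matrix_to_masks
  rw [if_neg h, PySem.List.foldl_append_singleton_eq_map,
    PySem.List.pyRange_zero_natCast (matrix.headD []).length, List.map_map, List.nil_append]
  rfl

-- B's port as a map of pvHorner over the columns
theorem pv_B_char (matrix : List (List Int)) (h : matrix ≠ []) :
    matrix_to_masks_alt matrix =
      (List.range (matrix.headD []).length).map (fun (c : Nat) => pvHorner matrix (c : Int)) := by
  unfold matrix_to_masks_alt
  rw [if_neg h, List.foldl_reverse]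
  exact pv_B_fold (matrix.headD []).length matrix

-- ===== VERDICT (by name: the statement is the Claim_ definition above) =====
theorem matrix_to_masks_spec : Claim_equal_matrix_to_masks := by
  intro matrix _ _
  unfold Spec_matrix_to_masks
  by_cases h : matrix = []
  · subst h; rfl
  · rw [pv_A_char matrix h, pv_B_char matrix h]
    apply List.map_congr_left
    intro c _
    rw [pvMask_eq_sum, pvSum_eq_horner, pvHorner_eq_sum]
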